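-- pv_equiv track=rewrite | github.com/yuichiinumaru/overpowers | skills/research/papers/skill/scripts/pubmed_search.py | filter_high_impact
-- ===== SOURCE A (Python) =====
-- from typing import List, Dict
--
-- HIGH_IMPACT_JOURNALS = {
--     # CNS 主刊
--     "Nature", "Science", "Cell",
--     # Nature 子刊
--     "Nature Medicine", "Nature Genetics", "Nature Biotechnology", "Nature Methods",
--     "Nature Immunology", "Nature Cancer", "Nature Cell Biology", "Nature Reviews Cancer",
--     "Nature Reviews Clinical Oncology", "Nature Reviews Drug Discovery", "Nature Biomedical Engineering",
--     "Nature Computational Science", "Nature Machine Intelligence", "Nature Communications",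
--     "Nature Structural & Molecular Biology", "Nature Chemical Biology", "Nature Microbiology",
--     # Science 子刊
--     "Science Translational Medicine", "Science Immunology", "Science Signaling",
--     "Science Advances", "Science Robotics",
--     # Cell 子刊
--     "Cell Research", "Cell Metabolism", "Cell Host & Microbe", "Cell Stem Cell",
--     "Cell Systems", "Molecular Cell", "Cancer Cell", "Immunity", "Neuron",
--     "Cell Genomics", "Cell Reports", "iScience", "Heliyon",
--     # 其他高影响力期刊
--     "The Lancet", "The Lancet Oncology", "The Lancet Digital Health",
--     "JAMA", "JAMA Oncology", "PNAS", "Proceedings of the National Academy of Sciences",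
--     "Genome Research", "Genome Biology", "Nucleic Acids Research",
--     "Bioinformatics", "Briefings in Bioinformatics",
--     "Cancer Research", "Clinical Cancer Research", "Journal of Clinical Oncology",
--     "Blood", "Leukemia", "Journal of Experimental Medicine",
--     "Gut", "Hepatology", "Gastroenterology",
-- }
--
-- def filter_high_impact(articles: List[Dict]) -> List[Dict]:
--     """筛选高影响力期刊文献"""
--     filtered = []
--     for article in articles:
--         journal = article.get("journal", "")
--         # 检查是否在高影响力期刊列表中
--         for high_impact_journal in HIGH_IMPACT_JOURNALS:
--             if high_impact_journal.lower() in journal.lower():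
--                 article["journal_tier"] = "High Impact"
--                 filtered.append(article)
--                 break
--     return filtered
-- ===== SOURCE B (Python) =====
-- import re
-- from typing import List, Dict
--
-- HIGH_IMPACT_JOURNALS = {
--     "Nature", "Science", "Cell",
--     "Nature Medicine", "Nature Genetics", "Nature Biotechnology", "Nature Methods",
--     "Nature Immunology", "Nature Cancer", "Nature Cell Biology", "Nature Reviews Cancer",
--     "Nature Reviews Clinical Oncology", "Nature Reviews Drug Discovery", "Nature Biomedical Engineering",
--     "Nature Computational Science", "Nature Machine Intelligence", "Nature Communications",
--     "Nature Structural & Molecular Biology", "Nature Chemical Biology", "Nature Microbiology",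
--     "Science Translational Medicine", "Science Immunology", "Science Signaling",
--     "Science Advances", "Science Robotics",
--     "Cell Research", "Cell Metabolism", "Cell Host & Microbe", "Cell Stem Cell",
--     "Cell Systems", "Molecular Cell", "Cancer Cell", "Immunity", "Neuron",
--     "Cell Genomics", "Cell Reports", "iScience", "Heliyon",
--     "The Lancet", "The Lancet Oncology", "The Lancet Digital Health",
--     "JAMA", "JAMA Oncology", "PNAS", "Proceedings of the National Academy of Sciences",
--     "Genome Research", "Genome Biology", "Nucleic Acids Research",
--     "Bioinformatics", "Briefings in Bioinformatics",
--     "Cancer Research", "Clinical Cancer Research", "Journal of Clinical Oncology",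
--     "Blood", "Leukemia", "Journal of Experimental Medicine",
--     "Gut", "Hepatology", "Gastroenterology",
-- }
--
-- # one compiled, case-insensitive alternation of all journal names
-- _PATTERN = re.compile("|".join(re.escape(j) for j in HIGH_IMPACT_JOURNALS), re.IGNORECASE)
--
--
-- def filter_high_impact(articles: List[Dict]) -> List[Dict]:
--     """筛选高影响力期刊文献"""
--     filtered = []
--     for article in articles:
--         if _PATTERN.search(article.get("journal", "")):
--             article["journal_tier"] = "High Impact"
--             filtered.append(article)
--     return filtered
-- ===== Notes on version B (the rewrite author's own statement) =====
-- stated objective: idiomatic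
-- what changed: Replaces A's per-article inner loop over the journal-name set (one lower-cased substring test per name) with a single module-level compiled case-insensitive regex alternation of the escaped names, searched once per article.
import Mathlib
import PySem

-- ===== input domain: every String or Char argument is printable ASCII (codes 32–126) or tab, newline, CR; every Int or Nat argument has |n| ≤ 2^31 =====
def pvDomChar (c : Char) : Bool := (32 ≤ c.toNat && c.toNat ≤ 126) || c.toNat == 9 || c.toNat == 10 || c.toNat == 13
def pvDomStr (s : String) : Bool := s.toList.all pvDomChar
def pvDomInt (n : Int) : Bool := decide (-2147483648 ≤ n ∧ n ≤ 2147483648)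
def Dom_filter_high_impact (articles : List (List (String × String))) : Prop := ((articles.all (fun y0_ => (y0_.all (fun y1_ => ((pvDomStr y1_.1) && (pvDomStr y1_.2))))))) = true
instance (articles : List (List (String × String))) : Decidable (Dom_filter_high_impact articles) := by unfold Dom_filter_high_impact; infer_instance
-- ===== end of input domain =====

-- B replaces A's inner loop over journal names (a substring test per name) with a single precompiled
-- case-insensitive regex alternation searched once per journal (objective: idiomatic). Both A and B
-- mutate the matching article dicts in place in Python; the equivalence proved here is about the
-- RETURN value (which contains those updated dicts).

-- ===== PORT A =====
-- HIGH_IMPACT_JOURNALS, in the insertion order of the Python set literal (A's result does not depend on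
-- the set's iteration order: the inner loop only decides WHETHER some name matches, then breaks)
def HIGH_IMPACT_JOURNALS : List String := [
  "Nature", "Science", "Cell",
  "Nature Medicine", "Nature Genetics", "Nature Biotechnology", "Nature Methods",
  "Nature Immunology", "Nature Cancer", "Nature Cell Biology", "Nature Reviews Cancer",
  "Nature Reviews Clinical Oncology", "Nature Reviews Drug Discovery", "Nature Biomedical Engineering",
  "Nature Computational Science", "Nature Machine Intelligence", "Nature Communications",
  "Nature Structural & Molecular Biology", "Nature Chemical Biology", "Nature Microbiology",
  "Science Translational Medicine", "Science Immunology", "Science Signaling",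
  "Science Advances", "Science Robotics",
  "Cell Research", "Cell Metabolism", "Cell Host & Microbe", "Cell Stem Cell",
  "Cell Systems", "Molecular Cell", "Cancer Cell", "Immunity", "Neuron",
  "Cell Genomics", "Cell Reports", "iScience", "Heliyon",
  "The Lancet", "The Lancet Oncology", "The Lancet Digital Health",
  "JAMA", "JAMA Oncology", "PNAS", "Proceedings of the National Academy of Sciences",
  "Genome Research", "Genome Biology", "Nucleic Acids Research",
  "Bioinformatics", "Briefings in Bioinformatics",
  "Cancer Research", "Clinical Cancer Research", "Journal of Clinical Oncology",
  "Blood", "Leukemia", "Journal of Experimental Medicine",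
  "Gut", "Hepatology", "Gastroenterology"]

-- A's inner 'for high_impact_journal in HIGH_IMPACT_JOURNALS: … break'
def pvInnerA (journal : String) (article : List (String × String))
    (acc : List (List (String × String))) : List String → List (List (String × String))
  | [] => acc
  | n :: rest =>
    if PySem.Str.isIn (PySem.Str.lower n) (PySem.Str.lower journal) then
      acc ++ [(PySem.Dict.insert (PySem.Dict.mk article) "journal_tier" "High Impact").items]
    else pvInnerA journal article acc rest

def filter_high_impact (articles : List (List (String × String))) : List (List (String × String)) :=
  articles.foldl (fun acc article =>
    pvInnerA (PySem.Dict.getD (PySem.Dict.mk article) "journal" "") article acc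
      (PySem.Set.ofList HIGH_IMPACT_JOURNALS)) []

-- ===== PORT B =====
-- _PATTERN = re.compile("|".join(re.escape(j) for j in HIGH_IMPACT_JOURNALS), re.IGNORECASE):
-- the alternatives of the pattern, in the iteration order of the set literal. Since every alternative
-- is an escaped LITERAL, the compiled pattern is just that list of literals; re.IGNORECASE on the ASCII
-- domain is exactly comparison of lower-cased strings, so the alternatives are stored lower-cased here.
def pvAlternatives : List String :=
  (PySem.Set.ofList HIGH_IMPACT_JOURNALS).map (fun j => PySem.Str.lower j)

-- Hand port of _PATTERN.search(journal) (PySem has no regex; exact for this pattern): Python's re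
-- scans start positions left to right and at each position tries the alternatives in pattern order,
-- succeeding iff some alternative matches there — i.e. is a prefix of the suffix starting there.
def pvSearch (alts : List String) (tail : List Char) : Bool :=
  if alts.any (fun alt => PySem.Chars.startswith tail alt.toList) then true
  else
    match tail with
    | [] => false
    | _ :: t => pvSearch alts t

-- truthiness of _PATTERN.search(journal) (IGNORECASE ⇒ search in the lower-cased journal)
def pvMatches (journal : String) : Bool :=
  pvSearch pvAlternatives (PySem.Str.lower journal).toList

def filter_high_impact_alt : List (List (String × String)) → List (List (String × String))
  | [] => []
  | article :: rest =>
    if pvMatches (PySem.Dict.getD (PySem.Dict.mk article) "journal" "") then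
      (PySem.Dict.insert (PySem.Dict.mk article) "journal_tier" "High Impact").items
        :: filter_high_impact_alt rest
    else filter_high_impact_alt rest

-- ===== PRECONDITION & SPEC =====
def Spec_filter_high_impact (articles : List (List (String × String))) (out : List (List (String × String))) : Prop := out = filter_high_impact_alt articles
instance (articles : List (List (String × String))) (out : List (List (String × String))) : Decidable (Spec_filter_high_impact articles out) := by unfold Spec_filter_high_impact; infer_instance

-- ===== CLAIM =====
def Claim_equal_filter_high_impact : Prop := ∀ (articles : List (List (String × String))), Dom_filter_high_impact articles → Spec_filter_high_impact articles (filter_high_impact articles)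

-- ===== LEMMAS AND PROOFS =====

-- A's inner loop appends exactly once iff some name matches
theorem pvInnerA_eq (journal : String) (article : List (String × String))
    (acc : List (List (String × String))) (names : List String) :
    pvInnerA journal article acc names =
      if names.any (fun n => PySem.Str.isIn (PySem.Str.lower n) (PySem.Str.lower journal)) then
        acc ++ [(PySem.Dict.insert (PySem.Dict.mk article) "journal_tier" "High Impact").items]
      else acc := by
  induction names with
  | nil => simp [pvInnerA]
  | cons n rest ih =>
    simp only [pvInnerA, List.any_cons, Bool.or_eq_true]
    by_cases h : PySem.Str.isIn (PySem.Str.lower n) (PySem.Str.lower journal) = true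
    · rw [if_pos h, if_pos (Or.inl h)]
    · rw [if_neg h, ih]
      by_cases h2 : (rest.any fun n => PySem.Str.isIn (PySem.Str.lower n) (PySem.Str.lower journal)) = true
      · rw [if_pos h2, if_pos (Or.inr h2)]
      · rw [if_neg h2, if_neg (by rintro (hc | hc); exacts [h hc, h2 hc])]

-- the regex search succeeds exactly on the infix occurrences of some alternative
theorem pvSearch_iff (alts : List String) (t : List Char) :
    pvSearch alts t = true ↔ ∃ m ∈ alts, m.toList <:+: t := by
  induction t with
  | nil =>
    rw [pvSearch]
    simp only [List.any_eq_true, PySem.Chars.startswith_iff, List.prefix_nil, List.infix_nil]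
    split
    · next h => simpa using h
    · next h => simpa using h
  | cons c t ih =>
    rw [pvSearch]
    by_cases h : alts.any (fun alt => PySem.Chars.startswith (c :: t) alt.toList) = true
    · rw [if_pos h]
      simp only [true_iff]
      rcases List.any_eq_true.mp h with ⟨m, hm, hp⟩
      exact ⟨m, hm, ((PySem.Chars.startswith_iff _ _).mp hp).isInfix⟩
    · rw [if_neg h]
      show pvSearch alts t = true ↔ _
      rw [ih]
      constructor
      · rintro ⟨m, hm, hinf⟩; exact ⟨m, hm, hinf.trans (t.suffix_cons c).isInfix⟩
      · rintro ⟨m, hm, hinf⟩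
        rcases List.infix_cons_iff.mp hinf with hpre | hinf'
        · exact absurd (List.any_eq_true.mpr ⟨m, hm, (PySem.Chars.startswith_iff _ _).mpr hpre⟩) h
        · exact ⟨m, hm, hinf'⟩

theorem mem_pvAlternatives (m : String) :
    m ∈ pvAlternatives ↔ ∃ n ∈ HIGH_IMPACT_JOURNALS, m = PySem.Str.lower n := by
  unfold pvAlternatives
  simp only [List.mem_map, PySem.Set.mem_ofList]
  constructor
  · rintro ⟨n, hn, rfl⟩; exact ⟨n, hn, rfl⟩
  · rintro ⟨n, hn, rfl⟩; exact ⟨n, hn, rfl⟩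

-- the two per-article tests agree
theorem pvCond_eq (journal : String) :
    (PySem.Set.ofList HIGH_IMPACT_JOURNALS).any
        (fun n => PySem.Str.isIn (PySem.Str.lower n) (PySem.Str.lower journal)) =
      pvMatches journal := by
  rw [Bool.eq_iff_iff]
  unfold pvMatches
  rw [pvSearch_iff, List.any_eq_true]
  constructor
  · rintro ⟨n, hn, hin⟩
    exact ⟨PySem.Str.lower n,
      (mem_pvAlternatives _).mpr ⟨n, (PySem.Set.mem_ofList _ _).mp hn, rfl⟩,
      (PySem.Str.isIn_iff_infix _ _).mp hin⟩
  · rintro ⟨m, hm, hinf⟩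
    rcases (mem_pvAlternatives m).mp hm with ⟨n, hn, rfl⟩
    exact ⟨n, (PySem.Set.mem_ofList _ _).mpr hn, (PySem.Str.isIn_iff_infix _ _).mpr hinf⟩

theorem pvFoldl_eq (articles : List (List (String × String)))
    (acc : List (List (String × String))) :
    articles.foldl (fun acc article =>
        pvInnerA (PySem.Dict.getD (PySem.Dict.mk article) "journal" "") article acc
          (PySem.Set.ofList HIGH_IMPACT_JOURNALS)) acc
      = acc ++ filter_high_impact_alt articles := by
  induction articles generalizing acc with
  | nil => simp [filter_high_impact_alt]
  | cons article rest ih =>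
    rw [List.foldl_cons, pvInnerA_eq, pvCond_eq, filter_high_impact_alt]
    by_cases h : pvMatches (PySem.Dict.getD (PySem.Dict.mk article) "journal" "") = true
    · simp [h, ih, List.append_assoc]
    · simp [h, ih]

-- ===== VERDICT =====
theorem filter_high_impact_spec : Claim_equal_filter_high_impact := by
  intro articles _
  unfold Spec_filter_high_impact filter_high_impact
  rw [pvFoldl_eq]
  simp
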